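-- pv_equiv track=rewrite | github.com/rugggg/ai_pin | full_clean.py | filter_response_length
-- ===== SOURCE A (Python) =====
-- MAX_RESPONSE_LENGTH = 2000   # filter responses longer than this
--
-- MIN_RESPONSE_LENGTH = 50     # filter responses shorter than this
--
-- def filter_response_length(row):
--     """
--     Remove samples where the assistant response is too long (verbose)
--     or too short (likely low quality / empty).
--     """
--     conversations = row.get("conversations") or []
--     has_assistant = False
--
--     for turn in conversations:
--         if turn.get("from") != "gpt":
--             continue
--
--         value = turn.get("value") or ""
--         has_assistant = True
--
--         if len(value) > MAX_RESPONSE_LENGTH: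
--             return False
--         if len(value) < MIN_RESPONSE_LENGTH:
--             return False
--
--     # drop samples with no assistant turn at all
--     return has_assistant
-- ===== SOURCE B (Python) =====
-- MAX_RESPONSE_LENGTH = 2000   # filter responses longer than this
--
-- MIN_RESPONSE_LENGTH = 50     # filter responses shorter than this
--
-- def filter_response_length(row):
--     """
--     Single pass maintaining aggregate statistics (shortest and longest
--     assistant-response length); one final comparison of these two
--     aggregates replaces per-turn bound checks and early returns.
--     """
--     shortest = None
--     longest = None
--     for turn in row.get("conversations") or []:
--         if turn.get("from") == "gpt":
--             n = len(turn.get("value") or "")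
--             if shortest is None or n < shortest:
--                 shortest = n
--             if longest is None or n > longest:
--                 longest = n
--     return shortest is not None and MIN_RESPONSE_LENGTH <= shortest and longest <= MAX_RESPONSE_LENGTH
-- ===== Notes on version B (the rewrite author's own statement) =====
-- stated objective: alternative
-- what changed: Replaces A's per-turn bound checks with early returns and a has_assistant flag by a single pass that maintains two aggregates (the shortest and longest assistant-response length) and decides with one final comparison of those aggregates.
import Mathlib
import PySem

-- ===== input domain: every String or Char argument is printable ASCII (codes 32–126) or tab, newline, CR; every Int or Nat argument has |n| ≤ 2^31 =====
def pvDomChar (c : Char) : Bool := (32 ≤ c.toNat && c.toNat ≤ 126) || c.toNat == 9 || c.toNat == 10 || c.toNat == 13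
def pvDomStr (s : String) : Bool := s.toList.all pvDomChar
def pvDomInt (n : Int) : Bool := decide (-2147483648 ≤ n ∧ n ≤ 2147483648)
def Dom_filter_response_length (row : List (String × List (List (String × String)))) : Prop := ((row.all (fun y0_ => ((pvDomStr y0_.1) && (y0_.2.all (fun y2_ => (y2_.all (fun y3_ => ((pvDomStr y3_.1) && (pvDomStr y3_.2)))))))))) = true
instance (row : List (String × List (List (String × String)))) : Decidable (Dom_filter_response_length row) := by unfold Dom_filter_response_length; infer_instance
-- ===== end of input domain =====

-- B replaces A's per-turn bound checks (early returns + has_assistant flag) by a single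
-- pass that maintains min/max aggregates of the assistant-response lengths and compares
-- the two aggregates once at the end; objective: alternative.

-- ===== PORT A =====
-- `row.get("conversations") or []`
def frlConvs (row : List (String × List (List (String × String)))) :
    List (List (String × String)) :=
  match (PySem.Dict.mk row).get? "conversations" with
  | some c => if c = [] then [] else c
  | none => []

-- `turn.get("value") or ""`
def frlValue (turn : List (String × String)) : String :=
  match (PySem.Dict.mk turn).get? "value" with
  | some v => if v = "" then "" else v
  | none => ""

-- the for-loop over conversations, carrying has_assistant; early returns become `false`
def frlLoop : List (List (String × String)) → Bool → Bool
  | [], has => has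
  | turn :: rest, has =>
    if (PySem.Dict.mk turn).get? "from" ≠ some "gpt" then
      frlLoop rest has
    else
      let value := frlValue turn
      if PySem.Str.len value > 2000 then false
      else if PySem.Str.len value < 50 then false
      else frlLoop rest true

def filter_response_length (row : List (String × List (List (String × String)))) : Bool :=
  frlLoop (frlConvs row) false

-- ===== PORT B =====
-- loop body of Source B: update the (shortest, longest) aggregates with one turn
def frlAggStep (acc : Option Int × Option Int) (turn : List (String × String)) :
    Option Int × Option Int :=
  if (PySem.Dict.mk turn).get? "from" == some "gpt" then
    let n := PySem.Str.len (frlValue turn)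
    let shortest := match acc.1 with
      | none => some n
      | some lo => if n < lo then some n else some lo
    let longest := match acc.2 with
      | none => some n
      | some hi => if n > hi then some n else some hi
    (shortest, longest)
  else acc

-- `shortest is not None and MIN <= shortest and longest <= MAX`
def frlFinal : Option Int × Option Int → Bool
  | (some lo, some hi) => decide (50 ≤ lo) && decide (hi ≤ 2000)
  | _ => false

def filter_response_length_alt (row : List (String × List (List (String × String)))) : Bool :=
  frlFinal ((frlConvs row).foldl frlAggStep (none, none))

-- ===== PRECONDITION & SPEC =====
def Spec_filter_response_length (row : List (String × List (List (String × String)))) (out : Bool) : Prop := out = filter_response_length_alt row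
instance (row : List (String × List (List (String × String)))) (out : Bool) : Decidable (Spec_filter_response_length row out) := by unfold Spec_filter_response_length; infer_instance

-- ===== CLAIM (what is proved, stated in full; the proofs are below) =====
def Claim_equal_filter_response_length : Prop := ∀ (row : List (String × List (List (String × String)))), Dom_filter_response_length row → Spec_filter_response_length row (filter_response_length row)

-- ===== LEMMAS AND PROOFS =====
-- the assistant-response lengths of a turn list
def frlLens (ts : List (List (String × String))) : List Int :=
  (ts.filter (fun turn => (PySem.Dict.mk turn).get? "from" == some "gpt")).map
    (fun t => PySem.Str.len (frlValue t))

def frlInB (n : Int) : Bool := decide (50 ≤ n) && decide (n ≤ 2000)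

-- A's loop equals "nonempty-or-flag AND all lengths in bounds"
theorem frlLoop_eq (ts : List (List (String × String))) (has : Bool) :
    frlLoop ts has = ((!(frlLens ts).isEmpty || has) && (frlLens ts).all frlInB) := by
  induction ts generalizing has with
  | nil => simp [frlLoop, frlLens]
  | cons t rest ih =>
    by_cases h : (PySem.Dict.mk t).get? "from" = some "gpt"
    · have hcons : frlLens (t :: rest) = ((frlValue t).length : Int) :: frlLens rest := by
        simp [frlLens, h, PySem.Str.len_eq]
      by_cases h1 : PySem.Str.len (frlValue t) > 2000
      · simp only [PySem.Str.len_eq, String.length_toList] at h1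
        have hb : frlInB ((frlValue t).length : Int) = false := by
          simp only [frlInB]; simp; omega
        simp [frlLoop, h, hcons, hb, PySem.Str.len_eq, String.length_toList]
        omega
      · by_cases h2 : PySem.Str.len (frlValue t) < 50
        · simp only [PySem.Str.len_eq, String.length_toList] at h1 h2
          have hb : frlInB ((frlValue t).length : Int) = false := by
            simp only [frlInB]; simp; omega
          simp [frlLoop, h, hcons, hb, PySem.Str.len_eq, String.length_toList]
          omega
        · simp only [PySem.Str.len_eq, String.length_toList] at h1 h2
          have hb : frlInB ((frlValue t).length : Int) = true := by
            simp only [frlInB]; simp; omega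
          have g1 : ¬ 2000 < (frlValue t).length := by omega
          have g2 : ¬ (frlValue t).length < 50 := by omega
          simp [frlLoop, h, ih, hcons, hb, g1, g2, PySem.Str.len_eq, String.length_toList]
    · simp only [frlLoop, ne_eq, h, not_false_eq_true, if_true, ih]
      simp [frlLens, h]

-- B's fold from a live accumulator: aggregates conjoin with the remaining bounds
theorem frlFold_some (ts : List (List (String × String))) (lo hi : Int) :
    frlFinal (ts.foldl frlAggStep (some lo, some hi)) =
      ((decide (50 ≤ lo) && decide (hi ≤ 2000)) && (frlLens ts).all frlInB) := by
  induction ts generalizing lo hi with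
  | nil => simp [frlFinal, frlLens]
  | cons t rest ih =>
    by_cases h : (PySem.Dict.mk t).get? "from" = some "gpt"
    · have hcons : frlLens (t :: rest) = ((frlValue t).length : Int) :: frlLens rest := by
        simp [frlLens, h, PySem.Str.len_eq]
      set n : Int := ((frlValue t).length : Int) with hn
      simp only [List.foldl_cons, frlAggStep, h, beq_self_eq_true, if_true,
        PySem.Str.len_eq, String.length_toList, ← hn]
      have e1 : (if n < lo then some n else some lo)
          = some (if n < lo then n else lo) := by split <;> rfl
      have e2 : (if n > hi then some n else some hi)
          = some (if n > hi then n else hi) := by split <;> rfl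
      simp only [e1, e2, ih]
      have d1 : decide (50 ≤ if n < lo then n else lo)
          = (decide (50 ≤ lo) && decide (50 ≤ n)) := by
        split <;> simp <;> omega
      have d2 : decide ((if n > hi then n else hi) ≤ 2000)
          = (decide (hi ≤ 2000) && decide (n ≤ 2000)) := by
        split <;> simp <;> omega
      simp only [d1, d2, hcons, List.all_cons, frlInB]
      simp only [Bool.and_assoc, Bool.and_comm, Bool.and_left_comm]
    · simp only [List.foldl_cons, frlAggStep, beq_iff_eq, h, if_false, ih]
      simp [frlLens, h]

-- B's fold from the initial (None, None) accumulator
theorem frlFold_none (ts : List (List (String × String))) :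
    frlFinal (ts.foldl frlAggStep (none, none)) =
      (!(frlLens ts).isEmpty && (frlLens ts).all frlInB) := by
  induction ts with
  | nil => simp [frlFinal, frlLens]
  | cons t rest ih =>
    by_cases h : (PySem.Dict.mk t).get? "from" = some "gpt"
    · simp only [List.foldl_cons, frlAggStep, h, beq_self_eq_true, if_true]
      rw [frlFold_some]
      simp [frlLens, h, frlInB, Bool.and_assoc, PySem.Str.len_eq]
    · simp only [List.foldl_cons, frlAggStep, beq_iff_eq, h, if_false, ih]
      simp [frlLens, h]

-- ===== VERDICT (by name: the statement is the Claim_ definition above) =====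
theorem filter_response_length_spec : Claim_equal_filter_response_length := by
  intro row _
  unfold Spec_filter_response_length filter_response_length filter_response_length_alt
  rw [frlLoop_eq, frlFold_none]
  simp
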